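-- pv_equiv track=rewrite | github.com/sebadel/adventofcode2020 | day14/day14.py | expand_addresses
-- ===== SOURCE A (Python) =====
-- def expand_addresses(value):
--     if 'X' not in value:
--         return [value]
--     else:
--         values = []
--         values.extend(expand_addresses(value.replace('X', '0', 1)))
--         values.extend(expand_addresses(value.replace('X', '1', 1)))
--         return values
-- ===== SOURCE B (Python) =====
-- def expand_addresses(value):
--     # One right-to-left pass: fold each character onto the list of expansions
--     # of the suffix already processed.
--     res = ['']
--     for c in reversed(value):
--         if c == 'X':
--             res = ['0' + s for s in res] + ['1' + s for s in res]
--         else: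
--             res = [c + s for s in res]
--     return res
-- ===== Notes on version B (the rewrite author's own statement) =====
-- stated objective: simpler
-- what changed: Replaces the double recursion over one-at-a-time wildcard replacement with a single right-to-left pass that folds each character onto the accumulated list of suffix expansions.
import Mathlib
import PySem

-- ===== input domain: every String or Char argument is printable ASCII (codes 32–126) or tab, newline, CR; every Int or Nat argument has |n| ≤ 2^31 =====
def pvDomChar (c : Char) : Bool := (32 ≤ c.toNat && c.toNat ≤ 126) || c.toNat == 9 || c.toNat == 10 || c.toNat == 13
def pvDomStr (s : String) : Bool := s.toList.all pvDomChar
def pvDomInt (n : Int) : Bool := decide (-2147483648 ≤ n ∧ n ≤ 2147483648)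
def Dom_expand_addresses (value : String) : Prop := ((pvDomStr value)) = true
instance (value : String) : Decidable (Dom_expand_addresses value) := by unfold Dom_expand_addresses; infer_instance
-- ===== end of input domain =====

-- B replaces A's double recursion over one-at-a-time wildcard replacement with one right-to-left fold over the characters (simpler, one pass).
-- ===== PORT A =====
-- hand port of value.replace('X', b, 1): replace the leftmost 'X'; exact for a one-char needle with count=1
def pvReplX (b : Char) : List Char → List Char
  | [] => []
  | c :: cs => if c = 'X' then b :: cs else c :: pvReplX b cs

-- 'X' in value (substring test) coincides with char membership for a one-char needle
theorem pv_isIn_singleton (l : List Char) :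
    PySem.Chars.isIn ['X'] l = true ↔ 'X' ∈ l := by
  rw [PySem.Chars.isIn_iff_infix]
  constructor
  · intro h
    exact h.sublist.subset (List.mem_singleton.mpr rfl)
  · intro h
    obtain ⟨s, t, rfl⟩ := List.append_of_mem h
    exact ⟨s, t, by simp⟩

theorem pvReplX_count_lt (b : Char) (hb : b ≠ 'X') :
    ∀ l : List Char, 'X' ∈ l → (pvReplX b l).count 'X' < l.count 'X' := by
  intro l hl
  induction l with
  | nil => cases hl
  | cons c cs ih =>
    by_cases hc : c = 'X'
    · subst hc
      simp [pvReplX, hb]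
    · have h : 'X' ∈ cs := (List.mem_cons.mp hl).resolve_left (fun he => hc he.symm)
      simpa [pvReplX, hc, List.count_cons] using ih h

def pvExpandA (l : List Char) : List (List Char) :=
  if PySem.Chars.isIn ['X'] l = false then [l]
  else pvExpandA (pvReplX '0' l) ++ pvExpandA (pvReplX '1' l)
termination_by l.count 'X'
decreasing_by
  · rename_i h
    exact pvReplX_count_lt '0' (by decide) l ((pv_isIn_singleton l).mp (by simpa using h))
  · rename_i h
    exact pvReplX_count_lt '1' (by decide) l ((pv_isIn_singleton l).mp (by simpa using h))

def expand_addresses (value : String) : List String :=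
  (pvExpandA value.toList).map (fun l => String.ofList l)

-- ===== PORT B =====
def pvStepB (res : List (List Char)) (c : Char) : List (List Char) :=
  if c = 'X' then res.map (fun s => '0' :: s) ++ res.map (fun s => '1' :: s)
  else res.map (fun s => c :: s)

def expand_addresses_alt (value : String) : List String :=
  (value.toList.reverse.foldl pvStepB [[]]).map (fun l => String.ofList l)

-- ===== PRECONDITION & SPEC =====
def Spec_expand_addresses (value : String) (out : List String) : Prop := out = expand_addresses_alt value
instance (value : String) (out : List String) : Decidable (Spec_expand_addresses value out) := by unfold Spec_expand_addresses; infer_instance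

-- ===== CLAIM (what is proved, stated in full; the proofs are below) =====
def Claim_equal_expand_addresses : Prop := ∀ (value : String), Dom_expand_addresses value → Spec_expand_addresses value (expand_addresses value)

-- ===== LEMMAS AND PROOFS =====
-- B's fold, in foldr form
def pvB (l : List Char) : List (List Char) := l.foldr (fun c res => pvStepB res c) [[]]

theorem pvB_eq_foldl (l : List Char) :
    l.reverse.foldl pvStepB [[]] = pvB l := by
  simp [pvB, List.foldl_reverse]

theorem pvB_cons (c : Char) (cs : List Char) : pvB (c :: cs) = pvStepB (pvB cs) c := rfl

theorem pvB_noX (l : List Char) (h : 'X' ∉ l) : pvB l = [l] := by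
  induction l with
  | nil => rfl
  | cons c cs ih =>
    have hc : c ≠ 'X' := fun hc => h (hc ▸ List.mem_cons_self ..)
    have hcs : 'X' ∉ cs := fun hm => h (List.mem_cons_of_mem _ hm)
    rw [pvB_cons, ih hcs]
    simp [pvStepB, hc]

theorem pvB_split (l : List Char) (h : 'X' ∈ l) :
    pvB l = pvB (pvReplX '0' l) ++ pvB (pvReplX '1' l) := by
  induction l with
  | nil => cases h
  | cons c cs ih =>
    by_cases hc : c = 'X'
    · subst hc
      show pvStepB (pvB cs) 'X' = pvB ('0' :: cs) ++ pvB ('1' :: cs)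
      rw [pvB_cons, pvB_cons]
      simp [pvStepB]
    · have hcs : 'X' ∈ cs := (List.mem_cons.mp h).resolve_left (fun he => hc he.symm)
      have h0 : pvReplX '0' (c :: cs) = c :: pvReplX '0' cs := by simp [pvReplX, hc]
      have h1 : pvReplX '1' (c :: cs) = c :: pvReplX '1' cs := by simp [pvReplX, hc]
      rw [h0, h1, pvB_cons, pvB_cons, pvB_cons, ih hcs]
      simp [pvStepB, hc]

theorem pvExpandA_eq_pvB (l : List Char) : pvExpandA l = pvB l := by
  induction l using pvExpandA.induct with
  | case1 l h =>
    have hnotin : 'X' ∉ l := by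
      intro hm
      have := (pv_isIn_singleton l).mpr hm
      simp [this] at h
    rw [pvExpandA, if_pos h, pvB_noX l hnotin]
  | case2 l h ih0 ih1 =>
    have hmem : 'X' ∈ l := (pv_isIn_singleton l).mp (by simpa using h)
    rw [pvExpandA, if_neg h, ih0, ih1, pvB_split l hmem]

-- ===== VERDICT (by name: the statement is the Claim_ definition above) =====
theorem expand_addresses_spec : Claim_equal_expand_addresses := by
  intro value _
  unfold Spec_expand_addresses expand_addresses expand_addresses_alt
  rw [pvB_eq_foldl, pvExpandA_eq_pvB]
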